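-- pv_equiv track=rewrite | github.com/Snex-Thadeus/Data-Structures-and-Algorithms | Codility/Dominator.py | solution
-- ===== SOURCE A (Python) =====
-- def solution(A):
--     if len(A)==0:
--         return 1
--     if len(A)==1:
--         return 0
--     B=A.copy() #B = sorted(A)
--     B.sort()
--
--     c=1 #Number of occurrences
--     n=len(B)
--     for i in range(1,n):
--         if B[i] != B[i-1]:
--             c=1
--         else:
--             c+=1
--         if c>int(n/2):
--             return A.index(B[i])
--
--     return -1
-- ===== SOURCE B (Python) =====
-- def solution(A):
--     n = len(A)
--     counts = {}
--     for x in A: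
--         counts[x] = counts.get(x, 0) + 1
--     for i, x in enumerate(A):
--         if counts[x] * 2 > n:
--             return i
--     return -1
-- ===== Notes on version B (the rewrite author's own statement) =====
-- stated objective: alternative
-- what changed: A sorts a copy of the list and scans it for a run longer than n/2 (plus a list.index pass); B makes one dict-counting pass and then returns the first index whose value has count > n/2, with no sort.
-- intended difference: On the empty list A returns 1 (a nonexistent index); B returns -1, the function's own no-dominator answer, which is the intended value. — e.g. on solution([]): A returns 1, B returns -1
import Mathlib
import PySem

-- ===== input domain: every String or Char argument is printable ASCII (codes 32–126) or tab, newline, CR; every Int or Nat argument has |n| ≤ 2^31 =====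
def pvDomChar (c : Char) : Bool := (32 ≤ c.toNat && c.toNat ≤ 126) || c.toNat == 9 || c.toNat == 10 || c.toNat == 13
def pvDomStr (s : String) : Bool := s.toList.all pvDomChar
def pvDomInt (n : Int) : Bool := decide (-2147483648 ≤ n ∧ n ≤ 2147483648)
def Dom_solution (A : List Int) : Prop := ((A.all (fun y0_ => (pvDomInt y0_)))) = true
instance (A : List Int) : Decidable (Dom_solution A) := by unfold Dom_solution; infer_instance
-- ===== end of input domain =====

-- B replaces A's sort-and-scan-runs search with one-pass dict counting + first index whose
-- value is a majority; on the empty list A returns 1, B returns -1 (see D_).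

-- ===== PORT A =====
-- A's loop 'for i in range(1, n)' reads only B[i] and B[i-1]; it is transliterated as
-- structural recursion over the sorted list carrying prev = B[i-1] and the same counter c.
-- int(n/2) is Nat division n/2 (exact: n is a list length, far below 2^53).
-- A.index(B[i]) is PySem.List.index?; B[i] ∈ B = sorted(A) so it is always found and
-- the .getD 0 default is never used.
def solutionGoA (A : List Int) (n : Nat) (prev : Int) (c : Nat) : List Int → Int
  | [] => -1
  | x :: rest =>
    let c' := if x ≠ prev then 1 else c + 1
    if c' > n / 2 then (((PySem.List.index? A x).getD 0 : Nat) : Int)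
    else solutionGoA A n x c' rest

def solution (A : List Int) : Int :=
  if A.length = 0 then 1
  else if A.length = 1 then 0
  else
    let B := PySem.List.sorted A (fun x => x) false
    let n := B.length
    match B with
    | [] => -1                         -- unreachable (length ≥ 2): the empty loop returns -1
    | b0 :: brest => solutionGoA A n b0 1 brest

-- ===== PORT B =====
-- counts[x] in the second loop: x ∈ A so the key is always present; getD's default is never used.
def solutionGoB (counts : PySem.Dict Int Int) (n : Nat) : List (Int × Int) → Int
  | [] => -1
  | (i, x) :: rest =>
    if counts.getD x 0 * 2 > (n : Int) then i
    else solutionGoB counts n rest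

def solution_alt (A : List Int) : Int :=
  let n := A.length
  let counts := A.foldl (fun d x => d.insert x (d.getD x 0 + 1)) PySem.Dict.empty
  solutionGoB counts n (PySem.List.enumerate A)

-- ===== PRECONDITION & SPEC =====
-- On the empty list A returns 1 (a nonexistent index); B returns -1, the function's own
-- "no dominator" answer, which is the intended value.
def D_solution (A : List Int) : Prop := A = []
instance (A : List Int) : Decidable (D_solution A) := by unfold D_solution; infer_instance
def Spec_solution (A : List Int) (out : Int) : Prop := ¬ D_solution A → out = solution_alt A
instance (A : List Int) (out : Int) : Decidable (Spec_solution A out) := by unfold Spec_solution; infer_instance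
def pvDiffWitness_solution : List Int := []
def pvDiffWitnessOut_solution : Int × Int := (1, -1)

-- ===== CLAIM (what is proved, stated in full; the proofs are below) =====
def Claim_unchanged_solution : Prop := ∀ (A : List Int), Dom_solution A → Spec_solution A (solution A)
def Claim_changed_solution : Prop := Dom_solution (pvDiffWitness_solution) ∧ D_solution (pvDiffWitness_solution) ∧ solution (pvDiffWitness_solution) = pvDiffWitnessOut_solution.1 ∧ solution_alt (pvDiffWitness_solution) = pvDiffWitnessOut_solution.2 ∧ pvDiffWitnessOut_solution.1 ≠ pvDiffWitnessOut_solution.2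
def Claim_exact_solution : Prop := ∀ (A : List Int), Dom_solution A → D_solution A → solution A ≠ solution_alt A

-- ===== LEMMAS AND PROOFS =====

-- the majority predicate both programs decide, and the common reference result
def pvP (A : List Int) (x : Int) : Bool := decide (A.length < 2 * A.count x)

def pvSpecF (A : List Int) : Int :=
  match A.findIdx? (pvP A) with
  | some i => (i : Int)
  | none => -1

-- two distinct values cannot both be majorities
theorem pvCountPair (s : List Int) (x v : Int) (h : x ≠ v) :
    s.count x + s.count v ≤ s.length := by
  induction s with
  | nil => simp
  | cons a t ih =>
    simp only [List.count_cons, List.length_cons]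
    by_cases hx : a = x <;> by_cases hv : a = v <;> simp_all <;> omega

theorem pvFind_eq (l : List Int) (p : Int → Bool) (v : Int)
    (h : ∀ x ∈ l, p x = (x == v)) : l.findIdx? p = PySem.List.index? l v := by
  rw [PySem.List.index?_eq_idxOf?]
  induction l with
  | nil => simp
  | cons a t ih =>
    have ha := h a (by simp)
    rw [List.findIdx?_cons, List.idxOf?_cons, ha]
    by_cases hav : a = v
    · simp [hav]
    · simp only [beq_iff_eq, hav, if_false]
      rw [ih (fun x hx => h x (by simp [hx]))]


theorem goB_spec (counts : PySem.Dict Int Int) (n : Nat) (A0 : List Int)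
    (hc : ∀ x : Int, counts.getD x 0 = (A0.count x : Int)) (hn : n = A0.length) :
    ∀ (l : List Int) (s : Int),
      solutionGoB counts n (PySem.List.enumerate l s) =
        (match l.findIdx? (pvP A0) with
         | some i => s + (i : Int)
         | none => -1) := by
  intro l
  induction l with
  | nil => intro s; simp [PySem.List.enumerate_nil, solutionGoB]
  | cons x t ih =>
    intro s
    rw [PySem.List.enumerate_cons]
    show (if counts.getD x 0 * 2 > (n : Int) then s else solutionGoB counts n (PySem.List.enumerate t (s+1))) = _
    rw [List.findIdx?_cons]
    have hcond : (counts.getD x 0 * 2 > (n : Int)) ↔ (pvP A0 x = true) := by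
      rw [hc x]
      subst hn
      simp only [pvP, decide_eq_true_eq]
      omega
    by_cases hp : pvP A0 x = true
    · rw [if_pos (hcond.mpr hp), hp]; simp
    · rw [if_neg (fun h => hp (hcond.mp h))]
      simp only [Bool.not_eq_true] at hp
      rw [hp, ih (s+1)]
      cases h : t.findIdx? (pvP A0) <;> simp [Int.add_comm, Int.add_left_comm]


theorem alt_eq_specF (A : List Int) : solution_alt A = pvSpecF A := by
  show solutionGoB _ _ _ = _
  rw [goB_spec _ _ A (fun x => by
        rw [PySem.Dict.foldl_insert_getD_add_one_eq_counter, PySem.Dict.getD_counter]) rfl A 0]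
  unfold pvSpecF
  cases h : A.findIdx? (pvP A) <;> simp


theorem goA_none (A0 : List Int) (s : List Int) (n : Nat) (hn : n = s.length)
    (hmaj : ∀ v ∈ s, 2 * s.count v ≤ n) :
    ∀ (rest done : List Int) (prev : Int) (c : Nat),
      s = done ++ rest → c ≤ done.count prev →
      solutionGoA A0 n prev c rest = -1 := by
  intro rest
  induction rest with
  | nil => intro done prev c _ _; rfl
  | cons x t ih =>
    intro done prev c hsplit hc
    have hxs : x ∈ s := by rw [hsplit]; simp
    have hcount : 2 * s.count x ≤ n := hmaj x hxs
    show (if (if x ≠ prev then 1 else c + 1) > n / 2 then _ else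
      solutionGoA A0 n x (if x ≠ prev then 1 else c + 1) t) = -1
    set c' := if x ≠ prev then 1 else c + 1 with hc'
    have hle : c' ≤ (done ++ [x]).count x := by
      by_cases hxp : x = prev
      · subst hxp
        simp only [hc', ne_eq, not_true_eq_false, if_false]
        rw [List.count_append]
        simp
        omega
      · have : c' = 1 := by simp [hc', hxp]
        rw [this, List.count_append]
        simp
    have hle2 : (done ++ [x]).count x ≤ s.count x := by
      have hs2 : s = (done ++ [x]) ++ t := by rw [hsplit]; simp
      rw [hs2]; simp [List.count_append]
    have hnotest : ¬ (c' > n / 2) := by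
      have : c' * 2 ≤ n := by omega
      have := (Nat.le_div_iff_mul_le (by norm_num : 0 < 2)).mpr this
      omega
    rw [if_neg hnotest]
    exact ih (done ++ [x]) x c' (by rw [hsplit]; simp) hle


theorem goA_found (A0 : List Int) (s : List Int) (n : Nat) (v : Int)
    (hsorted : s.Pairwise (· ≤ ·)) (hn : n = s.length) (hv : n < 2 * s.count v)
    (huniq : ∀ x ∈ s, n < 2 * s.count x → x = v) :
    ∀ (rest done : List Int) (prev : Int) (c : Nat),
      s = done ++ rest → c = done.count prev → (∀ y ∈ done, y ≤ prev) → prev ∈ done →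
      done.count v ≤ n / 2 →
      solutionGoA A0 n prev c rest = (((PySem.List.index? A0 v).getD 0 : Nat) : Int) := by
  intro rest
  induction rest with
  | nil =>
    intro done prev c hsplit _ _ _ hdv
    exfalso
    have : s.count v = done.count v := by rw [hsplit]; simp
    have h2 : done.count v * 2 ≤ n := (Nat.le_div_iff_mul_le (by norm_num : 0 < 2)).mp hdv
    omega
  | cons x t ih =>
    intro done prev c hsplit hc hmax hprevmem hdv
    have hxs : x ∈ s := by rw [hsplit]; simp
    -- cross ordering: everything in done ≤ everything in x :: t
    have hcross : ∀ a ∈ done, ∀ b ∈ x :: t, a ≤ b := by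
      have := hsorted
      rw [hsplit, List.pairwise_append] at this
      exact this.2.2
    have hpx : prev ≤ x := hcross prev hprevmem x (by simp)
    have hnotin : x ≠ prev → x ∉ done := by
      intro hne hmem
      exact hne (le_antisymm (hmax x hmem) hpx)
    set c' := if x ≠ prev then 1 else c + 1 with hc'
    have hceq : c' = (done ++ [x]).count x := by
      by_cases hxp : x = prev
      · subst hxp
        simp only [hc', ne_eq, not_true_eq_false, if_false]
        rw [hc, List.count_append]
        simp
      · have h1 : c' = 1 := by simp [hc', hxp]
        have h0 : done.count x = 0 := List.count_eq_zero.mpr (hnotin hxp)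
        rw [h1, List.count_append, h0]
        simp
    show (if c' > n / 2 then (((PySem.List.index? A0 x).getD 0 : Nat) : Int) else
      solutionGoA A0 n x c' t) = _
    by_cases htest : c' > n / 2
    · rw [if_pos htest]
      -- the returned value is the majority v
      have hcnt : (done ++ [x]).count x ≤ s.count x := by
        have hs2 : s = (done ++ [x]) ++ t := by rw [hsplit]; simp
        rw [hs2]; simp [List.count_append]
      have hmajx : n < 2 * s.count x := by
        have := Nat.div_lt_iff_lt_mul (by norm_num : 0 < 2) |>.mp (by omega : n / 2 < c')
        omega
      rw [huniq x hxs hmajx]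
    · rw [if_neg htest]
      have hdone' : s = (done ++ [x]) ++ t := by rw [hsplit]; simp
      refine ih (done ++ [x]) x c' hdone' hceq ?_ (by simp) ?_
      · intro y hy
        rcases List.mem_append.mp hy with hy | hy
        · exact hcross y hy x (by simp)
        · simp at hy; omega
      · by_cases hxv : x = v
        · subst hxv
          omega
        · rw [List.count_append]
          simpa [List.count_singleton, hxv] using hdv


theorem a_eq_specF (A : List Int) (hne : A ≠ []) : solution A = pvSpecF A := by
  have hlen0 : A.length ≠ 0 := by simpa using hne
  unfold solution
  rw [if_neg hlen0]
  by_cases h1 : A.length = 1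
  · rw [if_pos h1]
    obtain ⟨a, ha⟩ := List.length_eq_one_iff.mp h1
    subst ha
    simp [pvSpecF, pvP, List.findIdx?_cons]
  · rw [if_neg h1]
    have hlen2 : 2 ≤ A.length := by omega
    have hperm : (PySem.List.sorted A (fun x => x) false).Perm A := PySem.List.sorted_perm A _ _
    have hslen : (PySem.List.sorted A (fun x => x) false).length = A.length := hperm.length_eq
    have hscount : ∀ x : Int, (PySem.List.sorted A (fun x => x) false).count x = A.count x :=
      fun x => hperm.count_eq x
    have hsmem : ∀ x : Int, x ∈ (PySem.List.sorted A (fun x => x) false) ↔ x ∈ A :=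
      fun x => hperm.mem_iff
    have hpair : (PySem.List.sorted A (fun x => x) false).Pairwise (· ≤ ·) := by
      have := PySem.List.sorted_pairwise A (fun x => x)
      simpa using this
    obtain ⟨b0, brest, hs⟩ : ∃ b0 brest,
        PySem.List.sorted A (fun x => x) false = b0 :: brest := by
      cases h : PySem.List.sorted A (fun x => x) false with
      | nil => rw [h] at hslen; simp at hslen; omega
      | cons b0 brest => exact ⟨b0, brest, rfl⟩
    rw [hs] at hperm hslen hscount hsmem hpair ⊢
    show solutionGoA A (b0 :: brest).length b0 1 brest = pvSpecF A
    by_cases hex : ∃ v, v ∈ A ∧ A.length < 2 * A.count v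
    · obtain ⟨v, hvmem, hvcnt⟩ := hex
      have huniq : ∀ x ∈ (b0 :: brest), (b0 :: brest).length < 2 * (b0 :: brest).count x → x = v := by
        intro x hx hcx
        by_contra hxv
        have := pvCountPair A x v hxv
        rw [hscount, hslen] at hcx
        omega
      have hres := goA_found A (b0 :: brest) (b0 :: brest).length v hpair rfl
        (by rw [hscount, hslen]; exact hvcnt) huniq brest [b0] b0 1 rfl (by simp)
        (by simp) (by simp)
        (by
          have : List.count v [b0] ≤ 1 := by
            by_cases h : b0 = v <;> simp [h]
          have h2 : 1 ≤ (b0 :: brest).length / 2 := by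
            rw [hslen] at *
            omega
          omega)
      rw [hres]
      unfold pvSpecF
      rw [pvFind_eq A (pvP A) v (by
        intro x hx
        by_cases hxv : x = v
        · subst hxv
          simp [pvP, hvcnt]
        · have hcp := pvCountPair A x v hxv
          have hno : ¬ (A.length < 2 * A.count x) := by omega
          simp [pvP, hxv, hno])]
      cases hk : PySem.List.index? A v with
      | none => exact absurd ((PySem.List.index?_eq_none_iff A v).mp hk) (by simpa using hvmem)
      | some k => simp
    · push Not at hex
      have hres := goA_none A (b0 :: brest) (b0 :: brest).length rfl
        (by
          intro w hw
          have := hex w ((hsmem w).mp hw)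
          rw [hscount, hslen]
          omega) brest [b0] b0 1 rfl (by simp)
      rw [hres]
      unfold pvSpecF
      rw [List.findIdx?_eq_none_iff.mpr (by
        intro x hx
        have := hex x hx
        simp [pvP]
        omega)]


-- ===== VERDICT (by name: the statement is the Claim_ definition above) =====
theorem solution_spec : Claim_unchanged_solution := by
  intro A _ hD
  have h1 := a_eq_specF A hD
  have h2 := alt_eq_specF A
  unfold Spec_solution at *
  omega

theorem solution_changed : Claim_changed_solution := by
  unfold Claim_changed_solution; decide

theorem solution_tight : Claim_exact_solution := by
  intro A _ hD
  subst hD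
  decide
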